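-- pv_equiv track=rewrite | github.com/bazzoguilherme/tweet_analysis | TrabTweets.py | arruma_palavra
-- ===== SOURCE A (Python) =====
-- from string import ascii_lowercase, punctuation
--
-- def arruma_palavra(palavra):
--     translator = str.maketrans(punctuation, ' ' * len(punctuation))
--     palavra = palavra.lower()
--     palavra = palavra.translate(translator)
--     palavra_tam_m2 = palavra.split()
--     palavra_arrumada = [pal for pal in palavra_tam_m2 if len(pal)>2]
--     palavra_arrumada = ' '.join(palavra_arrumada)
--     return palavra_arrumada
-- ===== SOURCE B (Python) =====
-- from string import punctuation
--
-- def arruma_palavra(palavra):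
--     palavra = palavra.lower()
--     tokens = []
--     buf = []
--     for c in palavra:
--         if c in punctuation or c.isspace():
--             if buf:
--                 tokens.append(''.join(buf))
--                 buf = []
--         else:
--             buf.append(c)
--     if buf:
--         tokens.append(''.join(buf))
--     return ' '.join(t for t in tokens if len(t) > 2)
-- ===== Notes on version B (the rewrite author's own statement) =====
-- stated objective: alternative
-- what changed: Replaces the translate-punctuation-to-space + split() pipeline with a single explicit character scan that maintains a token buffer and flushes it at punctuation/whitespace boundaries.
import Mathlib
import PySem

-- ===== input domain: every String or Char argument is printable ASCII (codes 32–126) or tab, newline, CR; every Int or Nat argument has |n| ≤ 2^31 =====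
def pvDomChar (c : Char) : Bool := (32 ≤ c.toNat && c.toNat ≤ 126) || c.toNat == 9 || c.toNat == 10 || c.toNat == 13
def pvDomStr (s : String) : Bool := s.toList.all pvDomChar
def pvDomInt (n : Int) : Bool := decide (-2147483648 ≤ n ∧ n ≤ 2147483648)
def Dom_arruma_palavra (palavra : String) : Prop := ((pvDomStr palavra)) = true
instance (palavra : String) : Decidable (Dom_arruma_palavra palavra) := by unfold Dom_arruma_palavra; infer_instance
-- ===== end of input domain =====

-- B replaces A's translate+split pipeline with one explicit buffered character scan (alternative decomposition, same cost).

-- string.punctuation, shared by both Pythons (A imports it; B imports it too)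
def pvPunctuation : List Char := "!\"#$%&'()*+,-./:;<=>?@[\\]^_`{|}~".toList

def pvIsPunct (c : Char) : Bool := pvPunctuation.contains c

-- ===== PORT A =====
def arruma_palavra (palavra : String) : String :=
  -- str.translate with a table mapping each punctuation char to ' ' is exactly a per-character map (ported by hand)
  let p1 := PySem.Str.lower palavra
  let p2 := String.ofList (p1.toList.map (fun c => if pvIsPunct c then ' ' else c))
  let palavra_tam_m2 := PySem.Str.split₀ p2
  let palavra_arrumada := palavra_tam_m2.filter (fun pal => decide (2 < PySem.Str.len pal))
  PySem.Str.join " " palavra_arrumada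

-- ===== PORT B =====
-- the for-loop over the lowered string: buffer `cur`, token list `acc`
def pvTokGo : List Char → List Char → List String → List String
  | [], cur, acc => if cur = [] then acc else acc ++ [String.ofList cur]
  | c :: rest, cur, acc =>
    if pvIsPunct c || PySem.Chars.isspace c then
      if cur = [] then pvTokGo rest [] acc else pvTokGo rest [] (acc ++ [String.ofList cur])
    else pvTokGo rest (cur ++ [c]) acc

def arruma_palavra_alt (palavra : String) : String :=
  let tokens := pvTokGo (PySem.Str.lower palavra).toList [] []
  PySem.Str.join " " (tokens.filter (fun t => decide (2 < PySem.Str.len t)))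

-- ===== PRECONDITION & SPEC =====
def Spec_arruma_palavra (palavra : String) (out : String) : Prop := out = arruma_palavra_alt palavra
instance (palavra : String) (out : String) : Decidable (Spec_arruma_palavra palavra out) := by unfold Spec_arruma_palavra; infer_instance

-- ===== CLAIM (what is proved, stated in full; the proofs are below) =====
def Claim_equal_arruma_palavra : Prop := ∀ (palavra : String), Dom_arruma_palavra palavra → Spec_arruma_palavra palavra (arruma_palavra palavra)

-- ===== LEMMAS AND PROOFS =====

-- translating a char and then asking split()'s whitespace test = B's boundary test on the original char
theorem pv_isspace_sub (c : Char) :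
    PySem.Chars.isspace (if pvIsPunct c then ' ' else c) = (pvIsPunct c || PySem.Chars.isspace c) := by
  by_cases h : pvIsPunct c = true
  · simp [h]; decide
  · simp [h]

-- accumulator lemma for split₀.go
theorem pv_go_acc (xs : List Char) : ∀ cur acc,
    PySem.Chars.split₀.go xs cur acc = acc.reverse ++ PySem.Chars.split₀.go xs cur [] := by
  induction xs with
  | nil => intro cur acc; simp [PySem.Chars.split₀.go]; split_ifs <;> simp
  | cons c rest ih =>
    intro cur acc
    simp only [PySem.Chars.split₀.go]
    split_ifs with h1 h2
    · exact ih [] acc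
    · rw [ih [] (cur.reverse :: acc), ih [] [cur.reverse]]; simp
    · exact ih (c :: cur) acc

-- B's scan over cs equals A's split of the translated cs
theorem pv_tok_eq (cs : List Char) : ∀ cur (acc : List String),
    pvTokGo cs cur acc
      = acc ++ (PySem.Chars.split₀.go (cs.map (fun c => if pvIsPunct c then ' ' else c)) cur.reverse []).map String.ofList := by
  induction cs with
  | nil =>
    intro cur acc
    by_cases hc : cur = [] <;> simp [pvTokGo, PySem.Chars.split₀.go, hc]
  | cons c rest ih =>
    intro cur acc
    simp only [pvTokGo, List.map_cons, PySem.Chars.split₀.go, pv_isspace_sub]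
    by_cases hb : (pvIsPunct c || PySem.Chars.isspace c) = true
    · simp only [hb, if_true]
      by_cases hc : cur = []
      · simp [hc, ih [] acc]
      · rw [if_neg hc, if_neg (by simpa [List.isEmpty_iff] using hc),
          ih [] (acc ++ [String.ofList cur]), pv_go_acc _ [] [cur.reverse.reverse]]
        simp
    · have hp : pvIsPunct c = false := by revert hb; cases pvIsPunct c <;> simp
      have hs : PySem.Chars.isspace c = false := by revert hb; cases PySem.Chars.isspace c <;> simp
      simp [hp, hs, ih (cur ++ [c]) acc]

theorem arruma_eq (palavra : String) : arruma_palavra palavra = arruma_palavra_alt palavra := by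
  unfold arruma_palavra arruma_palavra_alt
  rw [pv_tok_eq _ [] []]
  simp [PySem.Str.split₀, PySem.Chars.split₀]

-- ===== VERDICT (by name: the statement is the Claim_ definition above) =====
theorem arruma_palavra_spec : Claim_equal_arruma_palavra := by
  intro palavra _
  exact arruma_eq palavra
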